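-- pv_equiv track=rewrite | github.com/hjyoon/baekjoon-answers | _20000/20310.py | solution
-- ===== SOURCE A (Python) =====
-- def solution(S):
--     ans = []
--     zero, one = 0, 0
--     for s in S:
--         if s == '0':
--             zero += 1
--         else:
--             one += 1
--
--     zero //= 2
--     one //= 2
--
--     for s in S:
--         if s == '0':
--             if zero > 0:
--                 zero -= 1
--                 ans.append(s)
--             else:
--                 continue
--         else:
--             if one > 0:
--                 one -= 1
--             else:
--                 ans.append(s)
--                 continue
--
--     ans = ''.join(ans)
--
--     return str(ans) if type(ans) != str else ans
-- ===== SOURCE B (Python) =====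
-- def solution(S):
--     z = sum(c == '0' for c in S)
--     o = len(S) - z
--     d = o // 2
--     mid = []
--     for c in S:
--         if c != '0' and d > 0:
--             d -= 1
--         else:
--             mid.append(c)
--     d = z - z // 2
--     out = []
--     for c in reversed(mid):
--         if c == '0' and d > 0:
--             d -= 1
--         else:
--             out.append(c)
--     out.reverse()
--     return ''.join(out)
-- ===== Notes on version B (the rewrite author's own statement) =====
-- stated objective: alternative
-- what changed: A makes one combined pass with two live budget counters deciding keep/drop for zeros and ones together; B decomposes the task into two opposite-direction sweeps: a forward pass dropping the first o//2 non-zeros, then a backward pass (over the reversed intermediate) dropping the last ceil(z/2) zeros.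
import Mathlib
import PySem

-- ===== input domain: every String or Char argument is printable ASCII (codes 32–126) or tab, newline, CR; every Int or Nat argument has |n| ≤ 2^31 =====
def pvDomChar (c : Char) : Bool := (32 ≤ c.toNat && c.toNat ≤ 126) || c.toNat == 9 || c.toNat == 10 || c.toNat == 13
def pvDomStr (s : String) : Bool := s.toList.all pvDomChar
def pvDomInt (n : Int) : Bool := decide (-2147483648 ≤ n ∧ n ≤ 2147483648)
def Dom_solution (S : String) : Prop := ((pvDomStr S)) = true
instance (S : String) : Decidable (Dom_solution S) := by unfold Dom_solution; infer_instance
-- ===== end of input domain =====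

-- B replaces A's single counter-driven filter loop with two opposite-direction sweeps
-- (drop the first o//2 ones forward, then drop the last ⌈z/2⌉ zeros backward): alternative decomposition, same cost.

-- ===== PORT A =====
-- first loop of A: count zeros and non-zeros
def aCount : List Char → Int → Int → Int × Int
  | [], z, o => (z, o)
  | c :: t, z, o => if c = '0' then aCount t (z + 1) o else aCount t z (o + 1)

-- second loop of A: keep a '0' while the zero budget lasts, keep a non-'0' once the one budget is spent
def aLoop : List Char → Int → Int → List Char
  | [], _, _ => []
  | c :: t, z, o =>
    if c = '0' then
      if z > 0 then c :: aLoop t (z - 1) o else aLoop t z o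
    else
      if o > 0 then aLoop t z (o - 1) else c :: aLoop t z o

def solution (S : String) : String :=
  let zo := aCount S.toList 0 0
  let z := PySem.Int.floordiv zo.1 2
  let o := PySem.Int.floordiv zo.2 2
  String.ofList (aLoop S.toList z o)

-- ===== PORT B =====
-- forward sweep: drop the first d non-'0' characters
def bDropOnes : List Char → Int → List Char
  | [], _ => []
  | c :: t, d => if c ≠ '0' ∧ 0 < d then bDropOnes t (d - 1) else c :: bDropOnes t d

-- backward sweep (runs on the reversed list): drop the first d '0' characters
def bDropZeros : List Char → Int → List Char
  | [], _ => []
  | c :: t, d => if c = '0' ∧ 0 < d then bDropZeros t (d - 1) else c :: bDropZeros t d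

def solution_alt (S : String) : String :=
  let z : Int := (S.toList.countP (· == '0') : Int)     -- sum(c == '0' for c in S)
  let o : Int := (S.toList.length : Int) - z
  let mid := bDropOnes S.toList (PySem.Int.floordiv o 2)
  let out := bDropZeros mid.reverse (z - PySem.Int.floordiv z 2)
  String.ofList out.reverse

-- ===== PRECONDITION & SPEC =====
def Spec_solution (S : String) (out : String) : Prop := out = solution_alt S
instance (S : String) (out : String) : Decidable (Spec_solution S out) := by unfold Spec_solution; infer_instance

-- ===== CLAIM (what is proved, stated in full; the proofs are below) =====
def Claim_equal_solution : Prop := ∀ (S : String), Dom_solution S → Spec_solution S (solution S)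

-- ===== LEMMAS AND PROOFS =====

-- proof-side: keep the first k zeros (drop the rest), keep every non-zero
def keepZeros : List Char → Int → List Char
  | [], _ => []
  | c :: t, k =>
    if c = '0' then
      (if 0 < k then c :: keepZeros t (k - 1) else keepZeros t k)
    else c :: keepZeros t k

-- proof-side: the zero-dropping budget left after bDropZeros has processed xs
def remZ : List Char → Int → Int
  | [], d => d
  | c :: t, d => if c = '0' ∧ 0 < d then remZ t (d - 1) else remZ t d

theorem aCount_spec (l : List Char) (z o : Int) :
    aCount l z o = (z + (l.count '0' : Int), o + ((l.length : Int) - (l.count '0' : Int))) := by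
  induction l generalizing z o with
  | nil => simp [aCount]
  | cons c t ih =>
    by_cases hc : c = '0' <;>
      simp [aCount, hc, ih, Prod.ext_iff] <;> omega

theorem keepZeros_nonpos (l : List Char) {k k' : Int} (hk : k ≤ 0) (hk' : k' ≤ 0) :
    keepZeros l k = keepZeros l k' := by
  induction l generalizing k k' with
  | nil => rfl
  | cons c t ih =>
    by_cases hc : c = '0' <;>
      simp [keepZeros, hc, show ¬ 0 < k by omega, show ¬ 0 < k' by omega, ih hk hk']

theorem aLoop_eq_keep_drop (l : List Char) (zb ob : Int) :
    aLoop l zb ob = keepZeros (bDropOnes l ob) zb := by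
  induction l generalizing zb ob with
  | nil => rfl
  | cons c t ih =>
    by_cases hc : c = '0'
    · simp [aLoop, bDropOnes, keepZeros, hc, ih]
    · by_cases ho : 0 < ob
      · simp [aLoop, bDropOnes, hc, ho, ih]
      · simp [aLoop, bDropOnes, keepZeros, hc, ho, ih]

theorem bDropZeros_append (xs ys : List Char) (d : Int) :
    bDropZeros (xs ++ ys) d = bDropZeros xs d ++ bDropZeros ys (remZ xs d) := by
  induction xs generalizing d with
  | nil => rfl
  | cons c t ih =>
    by_cases h : c = '0' ∧ 0 < d <;> simp [bDropZeros, remZ, h, ih]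

theorem remZ_spec (xs : List Char) (d : Int) :
    remZ xs d = max (d - (xs.count '0' : Int)) (min d 0) := by
  induction xs generalizing d with
  | nil => simp [remZ]
  | cons c t ih =>
    by_cases hc : c = '0'
    · by_cases hd : 0 < d <;> simp [remZ, hc, hd, ih] <;> omega
    · simp [remZ, hc, ih]

theorem keepZeros_eq_rev_drop (t : List Char) (k : Int) :
    keepZeros t k = (bDropZeros t.reverse ((t.count '0' : Int) - k)).reverse := by
  induction t generalizing k with
  | nil => rfl
  | cons c t' ih =>
    rw [List.reverse_cons, bDropZeros_append, remZ_spec, List.count_reverse]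
    by_cases hc : c = '0'
    · rw [show ((c :: t').count '0' : Int) = (t'.count '0' : Int) + 1 by simp [hc]]
      by_cases hk : 0 < k
      · have hcond : ¬ 0 < max ((t'.count '0' : Int) + 1 - k - (t'.count '0' : Int))
            (min ((t'.count '0' : Int) + 1 - k) 0) := by omega
        simp [keepZeros, bDropZeros, hc, hk, ih (k - 1), show ¬ k < 1 by omega,
          show (t'.count '0' : Int) + 1 - k = (t'.count '0' : Int) - (k - 1) by ring]
      · have hcond : 0 < max ((t'.count '0' : Int) + 1 - k - (t'.count '0' : Int))
            (min ((t'.count '0' : Int) + 1 - k) 0) := by omega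
        rw [show keepZeros (c :: t') k = keepZeros t' k by simp [keepZeros, hc, hk],
          keepZeros_nonpos t' (show k ≤ 0 by omega) (show k - 1 ≤ (0:Int) by omega), ih (k - 1)]
        simp [bDropZeros,
          show (t'.count '0' : Int) + 1 - k = (t'.count '0' : Int) - (k - 1) by ring]
        exact ⟨hc, by omega⟩
    · rw [show ((c :: t').count '0' : Int) = (t'.count '0' : Int) by simp [hc]]
      simp [keepZeros, bDropZeros, hc, ih k]

theorem count_bDropOnes (l : List Char) (d : Int) :
    (bDropOnes l d).count '0' = l.count '0' := by
  induction l generalizing d with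
  | nil => rfl
  | cons c t ih =>
    by_cases h : c ≠ '0' ∧ 0 < d
    · simp [bDropOnes, h, ih]
    · simp [bDropOnes, h, ih, List.count_cons]

theorem countP_eq_count (l : List Char) : l.countP (· == '0') = l.count '0' := by
  simp [List.count]

-- ===== VERDICT (by name: the statement is the Claim_ definition above) =====
theorem solution_spec : Claim_equal_solution := by
  intro S _
  unfold Spec_solution solution solution_alt
  rw [aCount_spec]
  simp only [zero_add, countP_eq_count]
  rw [aLoop_eq_keep_drop, keepZeros_eq_rev_drop, count_bDropOnes]
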